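-- pv_equiv track=rewrite | github.com/mavdian14/Portfolio | Beautiful Pairs.py | beautifulPairs
-- ===== SOURCE A (Python) =====
-- from collections import Counter
--
-- def beautifulPairs(A, B):
--     # Write your code here
--     a=Counter(A)
--     b=Counter(B)
--     #counter for all the unique matches of              A[i]=B[j]
--     b_set=0
--
--     #check keys in A & B, set b_set to the min occurences of that key in A or B
--     for val in a:
--         if val in b:
--             b_set+=min(a[val],b[val])
--
--     if b_set==len(A):
--         return b_set-1
--     else:
--         return b_set+1
-- ===== SOURCE B (Python) =====
-- from collections import Counter
--
-- def beautifulPairs(A, B):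
--     # One greedy pass over B, consuming a counter of A (multiset intersection).
--     remaining = Counter(A)
--     b_set = 0
--     for x in B:
--         if remaining[x] > 0:
--             remaining[x] -= 1
--             b_set += 1
--     if b_set == len(A):
--         return b_set - 1
--     return b_set + 1
-- ===== Notes on version B (the rewrite author's own statement) =====
-- stated objective: alternative
-- what changed: Instead of building two Counters and summing min(a[k],b[k]) over A's unique keys, B builds one Counter of A and makes a single greedy pass over the raw elements of B, decrementing the counter to count the multiset intersection; the final +-1 tail is unchanged.
import Mathlib
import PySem

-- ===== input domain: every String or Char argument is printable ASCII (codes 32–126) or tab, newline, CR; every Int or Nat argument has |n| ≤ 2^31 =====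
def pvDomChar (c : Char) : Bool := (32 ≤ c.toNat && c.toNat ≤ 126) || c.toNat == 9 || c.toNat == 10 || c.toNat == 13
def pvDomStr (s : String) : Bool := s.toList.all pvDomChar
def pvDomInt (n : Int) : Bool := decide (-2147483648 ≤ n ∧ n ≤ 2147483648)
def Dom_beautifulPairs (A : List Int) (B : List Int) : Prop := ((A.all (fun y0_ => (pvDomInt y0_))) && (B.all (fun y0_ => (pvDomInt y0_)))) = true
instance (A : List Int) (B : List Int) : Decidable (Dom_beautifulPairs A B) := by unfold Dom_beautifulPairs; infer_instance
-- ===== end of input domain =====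

-- B replaces A's two-Counter key-wise min sum by a single greedy pass over B's raw
-- elements consuming one Counter of A (alternative decomposition, same cost).

-- ===== PORT A =====
def beautifulPairs (A : List Int) (B : List Int) : Int :=
  let a := PySem.Dict.counter A
  let b := PySem.Dict.counter B
  let b_set : Int :=
    a.keys.foldl (fun b_set val =>
      if b.contains val then b_set + min (a.getD val 0) (b.getD val 0) else b_set) 0
  if b_set = (A.length : Int) then b_set - 1 else b_set + 1

-- ===== PORT B =====
-- loop body of Source B's 'for x in B'
def bpStep (st : PySem.Dict Int Int × Int) (x : Int) : PySem.Dict Int Int × Int :=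
  if st.1.getD x 0 > 0 then (st.1.modify x 0 (· - 1), st.2 + 1) else st

def beautifulPairs_alt (A : List Int) (B : List Int) : Int :=
  let st := B.foldl bpStep (PySem.Dict.counter A, 0)
  if st.2 = (A.length : Int) then st.2 - 1 else st.2 + 1

-- ===== PRECONDITION & SPEC =====
def Spec_beautifulPairs (A : List Int) (B : List Int) (out : Int) : Prop := out = beautifulPairs_alt A B
instance (A : List Int) (B : List Int) (out : Int) : Decidable (Spec_beautifulPairs A B out) := by unfold Spec_beautifulPairs; infer_instance

-- ===== CLAIM (what is proved, stated in full; the proofs are below) =====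
def Claim_equal_beautifulPairs : Prop := ∀ (A : List Int) (B : List Int), Dom_beautifulPairs A B → Spec_beautifulPairs A B (beautifulPairs A B)

-- ===== LEMMAS AND PROOFS =====

-- additive fold of f over a list
def bpSum (f : Int → Int) (s : List Int) : Int := s.foldl (fun acc v => acc + f v) 0

theorem bpSum_eq_sum (f : Int → Int) (s : List Int) : bpSum f s = (s.map f).sum := by
  unfold bpSum
  induction s using List.reverseRecOn with
  | nil => simp
  | append_singleton s x ih => simp [List.foldl_append, ih]

-- pointwise-equal functions give equal sums
theorem bpSum_congr (f g : Int → Int) (s : List Int) (h : ∀ v ∈ s, f v = g v) :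
    bpSum f s = bpSum g s := by
  rw [bpSum_eq_sum, bpSum_eq_sum]
  exact congrArg List.sum (List.map_congr_left h)

-- bumping the value at one element of a Nodup list bumps the sum by 1
theorem bpSum_bump (f g : Int → Int) (s : List Int) (x : Int)
    (hnd : s.Nodup) (hx : x ∈ s) (hgx : g x = f x + 1)
    (hoff : ∀ v, v ≠ x → g v = f v) :
    bpSum g s = bpSum f s + 1 := by
  rw [bpSum_eq_sum, bpSum_eq_sum]
  induction s with
  | nil => cases hx
  | cons a s ih =>
    rcases List.nodup_cons.mp hnd with ⟨hna, hnds⟩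
    rcases List.mem_cons.mp hx with rfl | hmem
    · have : s.map g = s.map f := List.map_congr_left (fun v hv => hoff v (fun h => hna (h ▸ hv)))
      simp [this, hgx]; ring
    · have ha : g a = f a := hoff a (fun h => hna (h ▸ hmem))
      simp only [List.map_cons, List.sum_cons, ha, ih hnds hmem]
      ring

-- the greedy invariant for B's loop over a prefix p of B
theorem bp_inv (A p : List Int) :
    (∀ v, ((p.foldl bpStep (PySem.Dict.counter A, (0 : Int))).1.getD v 0)
        = (A.count v : Int) - min (A.count v : Int) (p.count v : Int)) ∧
    (p.foldl bpStep (PySem.Dict.counter A, (0 : Int))).2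
        = bpSum (fun v => min ((A.count v : Int)) ((p.count v : Int))) (PySem.Set.ofList A) := by
  induction p using List.reverseRecOn with
  | nil =>
    constructor
    · intro v; simp [PySem.Dict.getD_counter]
    · rw [bpSum_congr _ (fun _ => 0) _ (by intro v _; simp)]
      simp [bpSum_eq_sum]
  | append_singleton p x ih =>
    obtain ⟨ihd, ihc⟩ := ih
    rw [List.foldl_append]
    set st := p.foldl bpStep (PySem.Dict.counter A, (0 : Int)) with hst
    simp only [List.foldl_cons, List.foldl_nil]
    have hcount : ∀ v : Int, ((p ++ [x]).count v) = p.count v + (if v = x then 1 else 0) := by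
      intro v; by_cases h : v = x <;> simp [List.count_append, List.count_singleton', h] <;> omega
    by_cases hc : st.1.getD x 0 > 0
    · -- counter still positive at x : consume it
      have hlt : (p.count x : Int) < (A.count x : Int) := by
        have := ihd x; omega
      have hxA : x ∈ A := by
        have h0 : (0:Int) < (A.count x : Int) := lt_of_le_of_lt (Int.natCast_nonneg _) hlt
        have : 0 < A.count x := by exact_mod_cast h0
        exact List.count_pos_iff.mp this
      constructor
      · intro v
        simp only [bpStep, if_pos hc]
        by_cases hv : v = x
        · subst hv
          rw [PySem.Dict.getD_modify_self, ihd v, hcount v]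
          simp; omega
        · rw [PySem.Dict.getD_modify, if_neg hv, ihd v, hcount v]
          simp [hv]
      · simp only [bpStep, if_pos hc]
        rw [ihc]
        refine (bpSum_bump _ _ _ x (PySem.Set.nodup_ofList A)
          ((PySem.Set.mem_ofList A x).mpr hxA) ?_ ?_).symm
        · rw [hcount x]; simp; omega
        · intro v hv; rw [hcount v]; simp [hv]
    · -- counter exhausted at x : state unchanged
      have hge : (A.count x : Int) ≤ (p.count x : Int) := by
        have := ihd x; omega
      constructor
      · intro v
        simp only [bpStep, if_neg hc]
        rw [ihd v, hcount v]
        by_cases hv : v = x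
        · subst hv; simp; omega
        · simp [hv]
      · simp only [bpStep, if_neg hc]
        rw [ihc]
        refine bpSum_congr _ _ _ ?_
        intro v _
        rw [hcount v]
        by_cases hv : v = x
        · subst hv; simp; omega
        · simp [hv]

-- A's key loop equals the same sum
theorem bp_a_sum (A B : List Int) :
    ((PySem.Dict.counter A).keys.foldl (fun b_set val =>
        if (PySem.Dict.counter B).contains val then
          b_set + min ((PySem.Dict.counter A).getD val 0) ((PySem.Dict.counter B).getD val 0)
        else b_set) (0 : Int))
      = bpSum (fun v => min ((A.count v : Int)) ((B.count v : Int))) (PySem.Set.ofList A) := by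
  rw [PySem.Dict.keys_counter]
  have hbody : ∀ (acc val : Int),
      (if (PySem.Dict.counter B).contains val then
        acc + min ((PySem.Dict.counter A).getD val 0) ((PySem.Dict.counter B).getD val 0)
      else acc)
      = acc + min ((A.count val : Int)) ((B.count val : Int)) := by
    intro acc val
    by_cases h : (PySem.Dict.counter B).contains val = true
    · rw [if_pos h, PySem.Dict.getD_counter, PySem.Dict.getD_counter]
    · rw [if_neg h]
      have hB : B.count val = 0 := by
        rw [PySem.Dict.contains_counter] at h
        exact List.count_eq_zero.mpr (fun hm => h (by simpa using hm))
      rw [hB]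
      simp
  have hfun : (fun (b_set val : Int) =>
      if (PySem.Dict.counter B).contains val then
        b_set + min ((PySem.Dict.counter A).getD val 0) ((PySem.Dict.counter B).getD val 0)
      else b_set)
      = (fun acc val => acc + min ((A.count val : Int)) ((B.count val : Int))) := by
    funext acc val; exact hbody acc val
  rw [hfun]; rfl

-- ===== VERDICT (by name: the statement is the Claim_ definition above) =====
theorem beautifulPairs_spec : Claim_equal_beautifulPairs := by
  intro A B _
  unfold Spec_beautifulPairs beautifulPairs beautifulPairs_alt
  have h1 := bp_a_sum A B
  have h2 := (bp_inv A B).2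
  simp only [h1, h2]
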